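-- pv_equiv track=rewrite | github.com/Nik0lay1/project-mind-mcp | code_intelligence.py | get_dependencies_with_depth
-- ===== SOURCE A (Python) =====
-- def get_dependencies_with_depth(
--     file_path: str, graph: dict[str, list[str]], depth: int = 2, direction: str = "downstream"
-- ) -> dict[str, int]:
--     """
--     Traverses dependency graph from file_path up to specified depth.
--
--     Args:
--         file_path: Starting file path (normalized, forward slashes)
--         graph: Import graph (file -> [imported files])
--         depth: Maximum depth to traverse (1-5)
--         direction: "downstream" (what it imports) or "upstream" (what imports it)
--
--     Returns:
--         Dict mapping file_path -> distance from origin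
--     """
--     if depth < 1 or depth > 5:
--         depth = 2
--
--     # Build reverse graph for upstream traversal
--     if direction == "upstream":
--         reverse_graph: dict[str, list[str]] = {}
--         for source, targets in graph.items():
--             for target in targets:
--                 if target not in reverse_graph:
--                     reverse_graph[target] = []
--                 reverse_graph[target].append(source)
--         working_graph = reverse_graph
--     else:
--         working_graph = graph
--
--     # BFS traversal
--     visited: dict[str, int] = {file_path: 0}
--     queue: list[tuple[str, int]] = [(file_path, 0)]
--
--     while queue:
--         current, dist = queue.pop(0)
--
--         if dist >= depth:
--             continue
--
--         neighbors = working_graph.get(current, [])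
--         for neighbor in neighbors:
--             if neighbor not in visited:
--                 visited[neighbor] = dist + 1
--                 queue.append((neighbor, dist + 1))
--
--     # Remove origin file
--     visited.pop(file_path, None)
--     return visited
-- ===== SOURCE B (Python) =====
-- def get_dependencies_with_depth(
--     file_path: str, graph: dict[str, list[str]], depth: int = 2, direction: str = "downstream"
-- ) -> dict[str, int]:
--     """Level-synchronous BFS: distances come from the level index, not a (node, dist) queue."""
--     if depth < 1 or depth > 5:
--         depth = 2
--
--     if direction == "upstream":
--         working_graph: dict[str, list[str]] = {}
--         for source, targets in graph.items():
--             for target in targets: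
--                 working_graph.setdefault(target, []).append(source)
--     else:
--         working_graph = graph
--
--     visited: dict[str, int] = {file_path: 0}
--     frontier: list[str] = [file_path]
--     for d in range(depth):
--         next_frontier: list[str] = []
--         for node in frontier:
--             for neighbor in working_graph.get(node, []):
--                 if neighbor not in visited:
--                     visited[neighbor] = d + 1
--                     next_frontier.append(neighbor)
--         frontier = next_frontier
--
--     visited.pop(file_path, None)
--     return visited
-- ===== Notes on version B (the rewrite author's own statement) =====
-- stated objective: alternative
-- what changed: Replaces the (node,dist) FIFO queue with pop(0) by a level-synchronous BFS: a plain frontier list per level, distances derived from the level index, and setdefault-based reverse-graph building.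
import Mathlib
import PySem

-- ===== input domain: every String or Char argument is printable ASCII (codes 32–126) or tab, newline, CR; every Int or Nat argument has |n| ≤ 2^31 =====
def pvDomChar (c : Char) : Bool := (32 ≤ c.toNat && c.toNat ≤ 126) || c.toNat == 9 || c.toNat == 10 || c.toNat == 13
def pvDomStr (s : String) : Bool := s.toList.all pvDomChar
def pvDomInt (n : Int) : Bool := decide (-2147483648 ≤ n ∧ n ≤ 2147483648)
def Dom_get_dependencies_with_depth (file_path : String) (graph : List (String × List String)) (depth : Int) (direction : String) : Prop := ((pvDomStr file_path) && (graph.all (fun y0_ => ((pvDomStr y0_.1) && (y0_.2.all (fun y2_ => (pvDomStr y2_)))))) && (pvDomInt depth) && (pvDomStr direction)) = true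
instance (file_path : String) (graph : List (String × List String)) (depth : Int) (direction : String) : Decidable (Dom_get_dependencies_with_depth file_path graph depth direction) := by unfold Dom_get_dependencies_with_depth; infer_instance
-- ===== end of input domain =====

-- B replaces A's (node,dist) FIFO queue (pop(0)) by a level-synchronous BFS whose distances come
-- from the level index; an alternative decomposition of the same traversal (return value only).

-- ===== PORT A =====
-- termination helpers for A's while-loop (cited by bfsA's decreasing_by; not part of the algorithm)
def pvUnvis (U : List String) (v : PySem.Dict String Int) : Nat :=
  (U.filter (fun x => !v.contains x)).length

def pvPhi (U : List String) (v : PySem.Dict String Int) (q : List (String × Int)) : Nat :=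
  q.length + 2 * pvUnvis U v

theorem pvUnvis_insert_le (U : List String) (v : PySem.Dict String Int) (n : String) (w : Int) :
    pvUnvis U (v.insert n w) ≤ pvUnvis U v := by
  unfold pvUnvis
  simp only [← List.countP_eq_length_filter]
  refine List.countP_mono_left ?_
  intro x _ hx
  simp only [Bool.not_eq_eq_eq_not, Bool.not_true, PySem.Dict.contains_insert,
    Bool.or_eq_false_iff] at hx ⊢
  exact hx.2

theorem pvUnvis_insert_lt (U : List String) (v : PySem.Dict String Int) (n : String) (w : Int)
    (hn : n ∈ U) (hv : v.contains n = false) :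
    pvUnvis U (v.insert n w) < pvUnvis U v := by
  induction U with
  | nil => cases hn
  | cons a U ih =>
    by_cases ha : a = n
    · subst ha
      have h1 : (v.insert a w).contains a = true := PySem.Dict.contains_insert_self v a w
      unfold pvUnvis
      simp [h1, hv]
      have := pvUnvis_insert_le U v a w
      unfold pvUnvis at this
      omega
    · have hca : (v.insert n w).contains a = v.contains a := by
        simp [PySem.Dict.contains_insert, ha]
      have hn' : n ∈ U := by
        rcases List.mem_cons.mp hn with h | h
        · exact absurd h.symm ha
        · exact h
      have := ih hn'
      unfold pvUnvis at this ⊢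
      simp only [List.filter_cons, hca]
      rcases h : v.contains a <;> simp <;> omega

theorem pv_mem_values_flatten {wg : PySem.Dict String (List String)} {c n : String}
    (h : n ∈ wg.getD c []) : n ∈ wg.values.flatten := by
  rcases hg : wg.get? c with _ | ns
  · rw [PySem.Dict.getD_of_get?_eq_none wg ([] : List String) hg] at h
    cases h
  · rw [PySem.Dict.getD_of_get?_eq_some wg ([] : List String) hg] at h
    have hmem : (c, ns) ∈ wg.items := PySem.Dict.mem_items_of_get?_eq_some wg hg
    exact List.mem_flatten.mpr ⟨ns, List.mem_map.mpr ⟨(c, ns), hmem, rfl⟩, h⟩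

theorem pvFold_phi_le (U : List String) (w : Int) (ns : List String)
    (hU : ∀ n ∈ ns, n ∈ U) :
    ∀ (v : PySem.Dict String Int) (q : List (String × Int)),
      pvPhi U (ns.foldl (fun s n => if s.1.contains n then s
          else (s.1.insert n w, s.2 ++ [(n, w)])) (v, q)).1
        (ns.foldl (fun s n => if s.1.contains n then s
          else (s.1.insert n w, s.2 ++ [(n, w)])) (v, q)).2 ≤ pvPhi U v q := by
  induction ns with
  | nil => intro v q; simp
  | cons n ns ih =>
    intro v q
    have hU' : ∀ m ∈ ns, m ∈ U := fun m hm => hU m (List.mem_cons_of_mem n hm)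
    simp only [List.foldl_cons]
    by_cases h : v.contains n
    · simp only [h, if_true]
      exact ih hU' v q
    · have hvf : v.contains n = false := by simpa using h
      simp only [hvf, Bool.false_eq_true, if_false]
      refine le_trans (ih hU' (v.insert n w) (q ++ [(n, w)])) ?_
      have hlt := pvUnvis_insert_lt U v n w (hU n List.mem_cons_self) hvf
      unfold pvPhi
      simp only [List.length_append, List.length_cons, List.length_nil]
      omega

def bfsA (wg : PySem.Dict String (List String)) (depth : Int)
    (queue : List (String × Int)) (visited : PySem.Dict String Int) : PySem.Dict String Int :=
  match queue with
  | [] => visited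
  | (current, dist) :: rest =>
    if depth ≤ dist then
      bfsA wg depth rest visited
    else
      let p := (wg.getD current []).foldl
        (fun (s : PySem.Dict String Int × List (String × Int)) n =>
          if s.1.contains n then s else (s.1.insert n (dist + 1), s.2 ++ [(n, dist + 1)]))
        (visited, rest)
      bfsA wg depth p.2 p.1
termination_by pvPhi wg.values.flatten visited queue
decreasing_by
  · simp [pvPhi]
  · have hle := pvFold_phi_le wg.values.flatten (dist + 1) (wg.getD current [])
      (fun n hn => pv_mem_values_flatten hn) visited rest
    simp only [dite_eq_ite] at *
    unfold pvPhi at hle ⊢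
    simp only [List.length_cons] at *
    omega

def get_dependencies_with_depth (file_path : String) (graph : List (String × List String))
    (depth : Int) (direction : String) : List (String × Int) :=
  let depth := if depth < 1 || 5 < depth then 2 else depth
  let g : PySem.Dict String (List String) := PySem.Dict.ofList graph
  let working_graph : PySem.Dict String (List String) :=
    if direction == "upstream" then
      g.items.foldl (fun rg p =>
        p.2.foldl (fun rg target =>
          let rg2 := if rg.contains target then rg else rg.insert target []
          rg2.insert target (rg2.getD target [] ++ [p.1])) rg) PySem.Dict.empty
    else g
  let visited := bfsA working_graph depth [(file_path, 0)]
    ((PySem.Dict.empty : PySem.Dict String Int).insert file_path 0)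
  -- visited.pop(file_path, None): the popped value is discarded, so this is erase
  (visited.erase file_path).items

-- ===== PORT B =====
def stepB (wg : PySem.Dict String (List String)) (d : Int)
    (s : PySem.Dict String Int × List String) (node : String) :
    PySem.Dict String Int × List String :=
  (wg.getD node []).foldl
    (fun s' n => if s'.1.contains n then s' else (s'.1.insert n (d + 1), s'.2 ++ [n])) s

def get_dependencies_with_depth_alt (file_path : String) (graph : List (String × List String))
    (depth : Int) (direction : String) : List (String × Int) :=
  let depth := if depth < 1 || 5 < depth then 2 else depth
  let g : PySem.Dict String (List String) := PySem.Dict.ofList graph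
  let working_graph : PySem.Dict String (List String) :=
    if direction == "upstream" then
      g.items.foldl (fun rg p =>
        p.2.foldl (fun rg target => rg.modify target [] (fun l => l ++ [p.1])) rg)
        PySem.Dict.empty
    else g
  let fin := (PySem.List.pyRange 0 depth 1).foldl
    (fun s d => s.2.foldl (stepB working_graph d) (s.1, []))
    (((PySem.Dict.empty : PySem.Dict String Int).insert file_path 0), [file_path])
  (fin.1.erase file_path).items

-- ===== PRECONDITION & SPEC =====
def Spec_get_dependencies_with_depth (file_path : String) (graph : List (String × List String)) (depth : Int) (direction : String) (out : List (String × Int)) : Prop := out = get_dependencies_with_depth_alt file_path graph depth direction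
instance (file_path : String) (graph : List (String × List String)) (depth : Int) (direction : String) (out : List (String × Int)) : Decidable (Spec_get_dependencies_with_depth file_path graph depth direction out) := by unfold Spec_get_dependencies_with_depth; infer_instance

-- ===== CLAIM (what is proved, stated in full; the proofs are below) =====
def Claim_equal_get_dependencies_with_depth : Prop := ∀ (file_path : String) (graph : List (String × List String)) (depth : Int) (direction : String), Dom_get_dependencies_with_depth file_path graph depth direction → Spec_get_dependencies_with_depth file_path graph depth direction (get_dependencies_with_depth file_path graph depth direction)

-- ===== LEMMAS AND PROOFS =====
-- A unfolding lemmas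
theorem bfsA_nil (wg : PySem.Dict String (List String)) (depth : Int)
    (v : PySem.Dict String Int) : bfsA wg depth [] v = v := by rw [bfsA]

theorem bfsA_cons_go (wg : PySem.Dict String (List String)) (depth d : Int) (x : String)
    (rest : List (String × Int)) (v : PySem.Dict String Int) (h : ¬ depth ≤ d) :
    bfsA wg depth ((x, d) :: rest) v =
      bfsA wg depth
        ((wg.getD x []).foldl
          (fun (s : PySem.Dict String Int × List (String × Int)) n =>
            if s.1.contains n then s else (s.1.insert n (d + 1), s.2 ++ [(n, d + 1)]))
          (v, rest)).2
        ((wg.getD x []).foldl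
          (fun (s : PySem.Dict String Int × List (String × Int)) n =>
            if s.1.contains n then s else (s.1.insert n (d + 1), s.2 ++ [(n, d + 1)]))
          (v, rest)).1 := by
  rw [bfsA]; simp [h]

theorem bfsA_cons_skip (wg : PySem.Dict String (List String)) (depth d : Int) (x : String)
    (rest : List (String × Int)) (v : PySem.Dict String Int) (h : depth ≤ d) :
    bfsA wg depth ((x, d) :: rest) v = bfsA wg depth rest v := by
  rw [bfsA]; simp [h]

-- the two reverse-graph builders agree
theorem stepRev_eq (rg : PySem.Dict String (List String)) (t s : String) :
    (let rg2 := if rg.contains t then rg else rg.insert t ([] : List String)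
     rg2.insert t (rg2.getD t [] ++ [s])) = rg.modify t [] (fun l => l ++ [s]) := by
  by_cases h : rg.contains t
  · simp [h, PySem.Dict.modify]
  · have hf : rg.contains t = false := by simpa using h
    simp only [hf, Bool.false_eq_true, if_false, PySem.Dict.modify]
    rw [PySem.Dict.getD_insert_self, PySem.Dict.insert_insert_self,
      PySem.Dict.getD_of_not_contains rg (d0 := []) hf]

theorem revInner_eq (src : String) (ts : List String) :
    ∀ rg : PySem.Dict String (List String),
      ts.foldl (fun rg target =>
        let rg2 := if rg.contains target then rg else rg.insert target []
        rg2.insert target (rg2.getD target [] ++ [src])) rg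
      = ts.foldl (fun rg target => rg.modify target [] (fun l => l ++ [src])) rg := by
  induction ts with
  | nil => intro rg; rfl
  | cons t ts ih =>
    intro rg
    simp only [List.foldl_cons]
    rw [stepRev_eq]
    exact ih _

theorem revOuter_eq (l : List (String × List String)) :
    ∀ rg : PySem.Dict String (List String),
      l.foldl (fun rg p =>
        p.2.foldl (fun rg target =>
          let rg2 := if rg.contains target then rg else rg.insert target []
          rg2.insert target (rg2.getD target [] ++ [p.1])) rg) rg
      = l.foldl (fun rg p =>
          p.2.foldl (fun rg target => rg.modify target [] (fun l => l ++ [p.1])) rg) rg := by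
  induction l with
  | nil => intro rg; rfl
  | cons p l ih =>
    intro rg
    simp only [List.foldl_cons]
    rw [revInner_eq]
    exact ih _

-- A's inner neighbour fold tracks B's with the queue = prefix ++ (level+1)-tagged frontier
theorem foldAB (d : Int) (ns : List String) :
    ∀ (v : PySem.Dict String Int) (P : List (String × Int)) (l : List String),
      ns.foldl (fun (s : PySem.Dict String Int × List (String × Int)) n =>
          if s.1.contains n then s else (s.1.insert n (d + 1), s.2 ++ [(n, d + 1)]))
        (v, P ++ l.map (fun x => (x, d + 1)))
      = ((ns.foldl (fun (s : PySem.Dict String Int × List String) n =>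
            if s.1.contains n then s else (s.1.insert n (d + 1), s.2 ++ [n])) (v, l)).1,
         P ++ (ns.foldl (fun (s : PySem.Dict String Int × List String) n =>
            if s.1.contains n then s else (s.1.insert n (d + 1), s.2 ++ [n])) (v, l)).2.map
            (fun x => (x, d + 1))) := by
  induction ns with
  | nil => intro v P l; rfl
  | cons n ns ih =>
    intro v P l
    simp only [List.foldl_cons]
    by_cases h : v.contains n
    · simp only [h, if_true]
      exact ih v P l
    · have hf : v.contains n = false := by simpa using h
      simp only [hf, Bool.false_eq_true, if_false]
      have : (P ++ l.map (fun x => (x, d + 1))) ++ [(n, d + 1)]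
          = P ++ (l ++ [n]).map (fun x => (x, d + 1)) := by
        simp
      rw [this]
      exact ih (v.insert n (d + 1)) P (l ++ [n])

-- one BFS level of A equals one frontier fold of B
theorem levelEq (wg : PySem.Dict String (List String)) (depth d : Int) (hd : d < depth)
    (f : List String) :
    ∀ (v : PySem.Dict String Int) (l : List String),
      bfsA wg depth (f.map (fun x => (x, d)) ++ l.map (fun x => (x, d + 1))) v
      = bfsA wg depth ((f.foldl (stepB wg d) (v, l)).2.map (fun x => (x, d + 1)))
          (f.foldl (stepB wg d) (v, l)).1 := by
  induction f with
  | nil => intro v l; rfl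
  | cons x f ih =>
    intro v l
    simp only [List.map_cons, List.cons_append, List.foldl_cons]
    rw [bfsA_cons_go wg depth d x _ v (not_le.mpr hd), foldAB]
    exact ih (stepB wg d (v, l) x).1 (stepB wg d (v, l) x).2

theorem terminalEq (wg : PySem.Dict String (List String)) (depth : Int) (f : List String) :
    ∀ v : PySem.Dict String Int, bfsA wg depth (f.map (fun x => (x, depth))) v = v := by
  induction f with
  | nil => intro v; exact bfsA_nil wg depth v
  | cons x f ih =>
    intro v
    rw [List.map_cons, bfsA_cons_skip wg depth depth x _ v le_rfl]
    exact ih v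

theorem mainEq (wg : PySem.Dict String (List String)) (depth : Int) :
    ∀ (n : Nat) (d : Int), d + n = depth →
      ∀ (v : PySem.Dict String Int) (f : List String),
        bfsA wg depth (f.map (fun x => (x, d))) v
        = ((PySem.List.pyRange d depth 1).foldl
            (fun s d' => s.2.foldl (stepB wg d') (s.1, [])) (v, f)).1 := by
  intro n
  induction n with
  | zero =>
    intro d hd v f
    have hde : d = depth := by omega
    subst hde
    rw [PySem.List.pyRange_one_eq_nil le_rfl, List.foldl_nil, terminalEq]
  | succ n ih =>
    intro d hd v f
    have hlt : d < depth := by omega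
    rw [PySem.List.pyRange_one_cons hlt, List.foldl_cons]
    have hsplit : f.map (fun x => (x, d))
        = f.map (fun x => (x, d)) ++ (([] : List String)).map (fun x => (x, d + 1)) := by simp
    rw [hsplit, levelEq wg depth d hlt f v []]
    have := ih (d + 1) (by omega) (f.foldl (stepB wg d) (v, [])).1 (f.foldl (stepB wg d) (v, [])).2
    simpa using this

-- ===== VERDICT (by name: the statement is the Claim_ definition above) =====
theorem get_dependencies_with_depth_spec : Claim_equal_get_dependencies_with_depth := by
  intro file_path graph depth direction _
  unfold Spec_get_dependencies_with_depth get_dependencies_with_depth get_dependencies_with_depth_alt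
  simp only [revOuter_eq]
  set d' := if depth < 1 || 5 < depth then 2 else depth with hd'
  have h1 : 1 ≤ d' := by
    rw [hd']; split_ifs with h
    · omega
    · simp only [Bool.or_eq_true, decide_eq_true_eq, not_or] at h
      omega
  set wg := (if direction == "upstream" then
      (PySem.Dict.ofList graph).items.foldl (fun rg p =>
          p.2.foldl (fun rg target => rg.modify target [] (fun l => l ++ [p.1])) rg)
        PySem.Dict.empty
    else PySem.Dict.ofList graph) with hwg
  have hmain := mainEq wg d' d'.toNat 0 (by omega)
    ((PySem.Dict.empty : PySem.Dict String Int).insert file_path 0) [file_path]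
  simp only [List.map_cons, List.map_nil] at hmain
  rw [hmain]
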